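-- pv_equiv track=rewrite | github.com/alfredomusumeci/PoetrySonification | flask_source/scraper.py | parse_notes_line
-- ===== SOURCE A (Python) =====
-- def parse_notes_line(line):
--     """ Process a set of notes and output them in the correct format.
--     Accepted combinations are: (^, ., *, _)Note; Note# or NoteNotelowercase;
--     Note-Note(-Note)*; (^, ., *, _)Note#; Note.
--     The symbols (^, ., *, _) indicate the registry, while the symbol #,
--     or a note represented by a lower case, represent the corresponding flat note
--     :param line: a string containing a set of note.
--     :return: a string containing the notes with correct whitespaces. """
--
--     registry = ['^', '_', '.', '*']
--
--     # Remove any accidental character that might have been kept during scraping.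
--     line = ''.join(ch for ch in line if ch.isalnum() or ch in registry + ['-', '#'])
--
--     # A while loop to update len(line) in real time at each iteration.
--     i = 0
--     while i < len(line) - 1:
--         if line[i].isalpha():
--             # Check for the note registry and add a space.
--             if line[i + 1] in registry:
--                 line = line[:i + 1] + ' ' + line[i + 1:]
--             # Check if the note is followed by another uppercase note and add a space.
--             elif line[i + 1].isalpha() and line[i + 1].isupper():
--                 line = line[:i + 1] + ' ' + line[i + 1:]
--         # Check if the note is flat
--         elif line[i] == '#' or (line[i].isalpha() and line[i].islower()):
--             # If the note is followed by anything else except the '-' char, add a space.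
--             if line[i + 1] != '-':
--                 line = line[:i + 1] + ' ' + line[i + 1:]
--         i += 1
--     return line
-- ===== SOURCE B (Python) =====
-- def parse_notes_line(line):
--     """ Process a set of notes and output them in the correct format (single pass). """
--     registry = ['^', '_', '.', '*']
--     chars = [ch for ch in line if ch.isalnum() or ch in registry + ['-', '#']]
--     out = []
--     for a, b in zip(chars, chars[1:]):
--         out.append(a)
--         if a.isalpha():
--             if b in registry or (b.isalpha() and b.isupper()):
--                 out.append(' ')
--         elif a == '#' and b != '-':
--             out.append(' ')
--     out.extend(chars[-1:])
--     return ''.join(out)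
-- ===== Notes on version B (the rewrite author's own statement) =====
-- stated objective: faster
-- what changed: Replaced A's while-loop that re-slices and re-concatenates the whole string at every insertion (and re-reads len(line) each iteration) by a single pass over adjacent character pairs of the filtered string that emits each character plus a space at every matching boundary.
import Mathlib
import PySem

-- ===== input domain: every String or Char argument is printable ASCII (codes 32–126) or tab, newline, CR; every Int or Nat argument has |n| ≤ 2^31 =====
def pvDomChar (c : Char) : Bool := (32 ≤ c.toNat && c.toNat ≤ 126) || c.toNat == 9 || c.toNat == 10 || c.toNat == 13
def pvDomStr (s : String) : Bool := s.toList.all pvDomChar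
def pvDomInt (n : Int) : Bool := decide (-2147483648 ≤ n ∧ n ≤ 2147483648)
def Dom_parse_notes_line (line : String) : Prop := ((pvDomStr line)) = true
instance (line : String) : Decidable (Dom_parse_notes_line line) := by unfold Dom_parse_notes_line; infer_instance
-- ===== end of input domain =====

-- B replaces A's quadratic while-loop (re-slicing the whole string at every insertion) by one
-- linear pass over adjacent character pairs that emits a space at each matching boundary.

-- ===== PORT A =====
def pvARegistry : List Char := ['^', '_', '.', '*']

-- the while loop of A; line[i] / line[i+1] are always in range when i < len-1, ported with getD;
-- the slices line[:i+1] and line[i+1:] have nonnegative bounds, ported as take/drop (exact there).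
-- fuel only makes the loop total: each iteration advances i by 1 and grows the line by at most 1,
-- so 2*len+2 iterations always suffice (proved in pvALoop_eq below).
def pvALoop : Nat → List Char → Nat → List Char
  | 0, line, _ => line
  | fuel + 1, line, i =>
    if i < line.length - 1 then
      let line' :=
        if PySem.Chars.isalpha (line.getD i ' ') then
          if pvARegistry.contains (line.getD (i+1) ' ') then
            line.take (i+1) ++ ' ' :: line.drop (i+1)
          else if PySem.Chars.isalpha (line.getD (i+1) ' ')
                  && PySem.Chars.isupper (line.getD (i+1) ' ') then
            line.take (i+1) ++ ' ' :: line.drop (i+1)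
          else line
        else if line.getD i ' ' == '#'
                || (PySem.Chars.isalpha (line.getD i ' ') && PySem.Chars.islower (line.getD i ' ')) then
          if line.getD (i+1) ' ' != '-' then
            line.take (i+1) ++ ' ' :: line.drop (i+1)
          else line
        else line
      pvALoop fuel line' (i+1)
    else line

def parse_notes_line (line : String) : String :=
  let cs := line.toList.filter (fun ch =>
    PySem.Chars.isalnum ch || (pvARegistry ++ ['-', '#']).contains ch)
  String.ofList (pvALoop (2 * cs.length + 2) cs 0)

-- ===== PORT B =====
def pvBRegistry : List Char := ['^', '_', '.', '*']

-- loop body of B: append the left char of the pair, then a space at a matching boundary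
def pvBStep (out : List Char) (ab : Char × Char) : List Char :=
  let out' := out ++ [ab.1]
  if PySem.Chars.isalpha ab.1 then
    if pvBRegistry.contains ab.2 || (PySem.Chars.isalpha ab.2 && PySem.Chars.isupper ab.2) then
      out' ++ [' ']
    else out'
  else if ab.1 == '#' && ab.2 != '-' then out' ++ [' ']
  else out'

def parse_notes_line_alt (line : String) : String :=
  let chars := line.toList.filter (fun ch =>
    PySem.Chars.isalnum ch || (pvBRegistry ++ ['-', '#']).contains ch)
  let out := (chars.zip (PySem.List.slice chars (some 1) none)).foldl pvBStep []
  String.ofList (out ++ PySem.List.slice chars (some (-1)) none)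

-- ===== PRECONDITION & SPEC =====
def Spec_parse_notes_line (line : String) (out : String) : Prop := out = parse_notes_line_alt line
instance (line : String) (out : String) : Decidable (Spec_parse_notes_line line out) := by unfold Spec_parse_notes_line; infer_instance

-- ===== CLAIM (what is proved, stated in full; the proofs are below) =====
def Claim_equal_parse_notes_line : Prop := ∀ (line : String), Dom_parse_notes_line line → Spec_parse_notes_line line (parse_notes_line line)

-- ===== LEMMAS AND PROOFS =====

-- the boundary relation both programs implement
def pvBnd (a b : Char) : Bool :=
  if PySem.Chars.isalpha a then
    pvARegistry.contains b || (PySem.Chars.isalpha b && PySem.Chars.isupper b)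
  else a == '#' && b != '-'

-- canonical result: the input with a space after every matching boundary
def pvSpec : List Char → List Char
  | [] => []
  | [a] => [a]
  | a :: b :: r => a :: (if pvBnd a b then ' ' :: pvSpec (b :: r) else pvSpec (b :: r))

lemma pvBStep_eq (out : List Char) (ab : Char × Char) :
    pvBStep out ab = out ++ (ab.1 :: (if pvBnd ab.1 ab.2 then [' '] else [])) := by
  rcases ab with ⟨a, b⟩
  simp only [pvBStep, pvBnd, pvBRegistry, pvARegistry]
  by_cases ha : PySem.Chars.isalpha a = true <;>
    simp [ha] <;> split_ifs <;> simp_all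

lemma pvB_flat (cs : List Char) :
    (cs.zip (cs.drop 1)).foldl pvBStep [] ++ cs.drop (cs.length - 1) = pvSpec cs := by
  have hstep : pvBStep = fun out ab =>
      out ++ (ab.1 :: (if pvBnd ab.1 ab.2 then [' '] else [])) := by
    funext out ab; exact pvBStep_eq out ab
  rw [hstep]
  induction cs using pvSpec.induct with
  | case1 => rfl
  | case2 a => rfl
  | case3 a b r ih =>
    rw [PySem.List.foldl_append_eq_flatMap] at ih ⊢
    simp only [List.drop_one, List.tail_cons, List.zip_cons_cons, List.flatMap_cons] at ih ⊢
    have hd : (a :: b :: r).drop ((a :: b :: r).length - 1) = (b :: r).drop ((b :: r).length - 1) := by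
      simp [List.drop_succ_cons]
    rw [hd]
    simp only [List.nil_append] at ih ⊢
    by_cases hb : pvBnd a b = true <;> simp [pvSpec, hb, ← ih]

lemma pvALoop_eq :
    ∀ (fuel : Nat) (L : List Char) (i : Nat), 2 * (L.length - i) ≤ fuel →
      pvALoop fuel L i = L.take i ++ pvSpec (L.drop i) := by
  intro fuel
  induction fuel using Nat.strong_induction_on with
  | _ fuel ihstrong =>
  intro L i h
  rcases fuel with _ | fuel
  · have hle : L.length ≤ i := by omega
    simp [pvALoop, List.take_of_length_le hle, List.drop_eq_nil_of_le hle, pvSpec]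
  by_cases hi : i < L.length - 1
  · have h1 : i < L.length := by omega
    have h2 : i + 1 < L.length := by omega
    have hga : L.getD i ' ' = L[i] := List.getD_eq_getElem L ' ' h1
    have hgb : L.getD (i + 1) ' ' = L[i + 1] := List.getD_eq_getElem L ' ' h2
    have hdi : L.drop i = L[i] :: L[i + 1] :: L.drop (i + 2) := by
      rw [List.drop_eq_getElem_cons h1, List.drop_eq_getElem_cons h2]
    have htake : L.take (i + 1) = L.take i ++ [L[i]] := by
      rw [List.take_add_one, List.getElem?_eq_getElem h1]; rfl
    -- no-insert step
    have noinsert : pvBnd L[i] L[i+1] = false →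
        pvALoop fuel L (i + 1) = L.take i ++ pvSpec (L.drop i) := by
      intro hb
      rw [ihstrong fuel (by omega) L (i + 1) (by omega)]
      rw [List.drop_eq_getElem_cons h2, hdi,
        show pvSpec (L[i] :: L[i+1] :: L.drop (i+2)) = L[i] :: pvSpec (L[i+1] :: L.drop (i+2)) from
          by simp [pvSpec, hb],
        htake, List.append_assoc, List.singleton_append]
    -- insert step: state becomes take(i+1) ++ ' ' :: drop(i+1), and the next
    -- iteration examines the inserted space, inserting nothing
    have insert : pvBnd L[i] L[i+1] = true →
        pvALoop fuel (L.take (i + 1) ++ ' ' :: L.drop (i + 1)) (i + 1)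
          = L.take i ++ pvSpec (L.drop i) := by
      intro hb
      have hlt : (L.take (i + 1)).length = i + 1 := by rw [List.length_take]; omega
      have hlen' : (L.take (i + 1) ++ ' ' :: L.drop (i + 1)).length = L.length + 1 := by
        simp only [List.length_append, List.length_cons, List.length_drop, hlt]
        omega
      rcases fuel with _ | fuel
      · exfalso; omega
      rw [pvALoop, if_pos (by omega)]
      have hg : (L.take (i + 1) ++ ' ' :: L.drop (i + 1)).getD (i + 1) ' ' = ' ' := by
        rw [List.getD_eq_getElem _ _ (by omega), List.getElem_append_right (by omega)]
        simp [hlt]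
      rw [hg]
      simp only [show PySem.Chars.isalpha ' ' = false from by decide,
        show (' ' == '#') = false from by decide, Bool.false_and, Bool.false_eq_true, if_false, Bool.or_self]
      rw [ihstrong fuel (by omega) _ (i + 1 + 1) (by omega)]
      have hsplit : L.take (i + 1) ++ ' ' :: L.drop (i + 1)
          = (L.take (i + 1) ++ [' ']) ++ L.drop (i + 1) := by simp
      have htk2 : (L.take (i + 1) ++ ' ' :: L.drop (i + 1)).take (i + 1 + 1)
          = L.take (i + 1) ++ [' '] := by
        rw [hsplit, List.take_left' (by simp [hlt])]
      have hdr2 : (L.take (i + 1) ++ ' ' :: L.drop (i + 1)).drop (i + 1 + 1)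
          = L.drop (i + 1) := by
        rw [hsplit, List.drop_left' (by simp [hlt])]
      rw [htk2, hdr2, List.drop_eq_getElem_cons h2, hdi,
        show pvSpec (L[i] :: L[i+1] :: L.drop (i+2))
            = L[i] :: ' ' :: pvSpec (L[i+1] :: L.drop (i+2)) from by simp [pvSpec, hb],
        htake]
      simp only [List.append_assoc, List.cons_append, List.nil_append]
    -- unfold one iteration of the loop
    rw [pvALoop, if_pos hi, hga, hgb]
    by_cases ha : PySem.Chars.isalpha L[i] = true
    · by_cases hc1 : pvARegistry.contains L[i+1] = true
      · rw [if_pos ha, if_pos hc1]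
        exact insert (by unfold pvBnd; rw [if_pos ha, hc1]; rfl)
      · have hc1' : pvARegistry.contains L[i+1] = false := by simpa using hc1
        by_cases hc2 : (PySem.Chars.isalpha L[i+1] && PySem.Chars.isupper L[i+1]) = true
        · rw [if_pos ha, if_neg (by rw [hc1']; exact Bool.false_ne_true), if_pos hc2]
          exact insert (by unfold pvBnd; rw [if_pos ha, hc1', hc2]; rfl)
        · have hc2' : (PySem.Chars.isalpha L[i+1] && PySem.Chars.isupper L[i+1]) = false := by
            simpa using hc2
          rw [if_pos ha, if_neg (by rw [hc1']; exact Bool.false_ne_true), if_neg (by rw [hc2']; exact Bool.false_ne_true)]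
          exact noinsert (by unfold pvBnd; rw [if_pos ha, hc1', hc2']; rfl)
    · have ha' : PySem.Chars.isalpha L[i] = false := by simpa using ha
      rw [if_neg ha]
      by_cases hsh : (L[i] == '#') = true
      · by_cases hbd : (L[i+1] != '-') = true
        · rw [if_pos (by rw [hsh]; rfl), if_pos hbd]
          exact insert (by unfold pvBnd; rw [if_neg (by rw [ha']; exact Bool.false_ne_true), hsh, hbd]; rfl)
        · have hbd' : (L[i+1] != '-') = false := by simpa using hbd
          rw [if_pos (by rw [hsh]; rfl), if_neg (by rw [hbd']; exact Bool.false_ne_true)]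
          exact noinsert (by unfold pvBnd; rw [if_neg (by rw [ha']; exact Bool.false_ne_true), hbd']; simp)
      · have hsh' : (L[i] == '#') = false := by simpa using hsh
        rw [if_neg (by rw [hsh', ha']; simp)]
        exact noinsert (by unfold pvBnd; rw [if_neg (by rw [ha']; exact Bool.false_ne_true), hsh']; rfl)
  · rw [pvALoop, if_neg hi]
    have hsp : pvSpec (L.drop i) = L.drop i := by
      have hl : (L.drop i).length ≤ 1 := by simp [List.length_drop]; omega
      match hd : L.drop i, hl with
      | [], _ => rfl
      | [a], _ => rfl
    rw [hsp, List.take_append_drop]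

lemma pv_slice_last (cs : List Char) :
    PySem.List.slice cs (some (-1)) none = cs.drop (cs.length - 1) := by
  match cs with
  | [] => rfl
  | a :: r =>
    simp only [PySem.List.slice, PySem.List.clampIdx]
    have h1 : ((a :: r).length : Int) + (-1) = r.length := by simp
    norm_num [h1]
    simp only [if_neg (by omega : ¬ ((r.length : Int) < 0))]
    have h3 : r.length + 1 - r.length = 1 := by omega
    simp only [h3]
    have h6 : (List.drop r.length (a :: r)).length ≤ 1 := by simp
    simp [List.take_of_length_le h6]

-- ===== VERDICT (by name: the statement is the Claim_ definition above) =====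
theorem parse_notes_line_spec : Claim_equal_parse_notes_line := by
  intro line _
  unfold Spec_parse_notes_line parse_notes_line parse_notes_line_alt
  simp only [pvBRegistry, pvARegistry]
  set cs := line.toList.filter (fun ch =>
    PySem.Chars.isalnum ch || (['^', '_', '.', '*'] ++ ['-', '#']).contains ch) with hcs
  congr 1
  rw [pvALoop_eq (2 * cs.length + 2) cs 0 (by omega)]
  rw [PySem.List.slice_from cs (by norm_num : (0:Int) ≤ (1:Int)), pv_slice_last]
  simp only [List.take_zero, List.drop_zero, List.nil_append, Int.toNat_one]
  exact (pvB_flat cs).symm
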